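-- pv_equiv track=rewrite | github.com/pypi-data/pypi-mirror-321 | packages/autopilot-tools/autopilot_tools-0.5.4-py3-none-any.whl/autopilot_tools/log_analyzer/ice.py | clamp_dataset
-- ===== SOURCE A (Python) =====
-- def clamp_dataset(timestamps, data, first_work_timestamp, last_work_timestamp):
--     first_rpm_idx = len(timestamps) - 1
--     for idx, timestamp in enumerate(timestamps):
--         if timestamp > first_work_timestamp:
--             first_rpm_idx = idx
--             break
--     last_rpm_idx = len(timestamps) - 1
--
--     for idx, timestamp in reversed(list(enumerate(timestamps))):
--         if timestamps[idx] < last_work_timestamp: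
--             last_rpm_idx = idx
--             break
--     timestamps = timestamps[first_rpm_idx: last_rpm_idx]
--     data = data[first_rpm_idx: last_rpm_idx]
--     return timestamps, data
-- ===== SOURCE B (Python) =====
-- def clamp_dataset(timestamps, data, first_work_timestamp, last_work_timestamp):
--     n = len(timestamps)
--     first_rpm_idx = n - 1
--     last_rpm_idx = n - 1
--     found_first = False
--     for idx, timestamp in enumerate(timestamps):
--         if not found_first and timestamp > first_work_timestamp:
--             first_rpm_idx = idx
--             found_first = True
--         if timestamp < last_work_timestamp:
--             last_rpm_idx = idx
--     return timestamps[first_rpm_idx:last_rpm_idx], data[first_rpm_idx:last_rpm_idx]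
-- ===== Notes on version B (the rewrite author's own statement) =====
-- stated objective: simpler
-- what changed: B replaces A's two separate scans (a forward break-scan plus a materialized reversed(list(enumerate(...))) break-scan with a redundant timestamps[idx] re-index) by a single forward pass that tracks both boundary indices at once.
import Mathlib
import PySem

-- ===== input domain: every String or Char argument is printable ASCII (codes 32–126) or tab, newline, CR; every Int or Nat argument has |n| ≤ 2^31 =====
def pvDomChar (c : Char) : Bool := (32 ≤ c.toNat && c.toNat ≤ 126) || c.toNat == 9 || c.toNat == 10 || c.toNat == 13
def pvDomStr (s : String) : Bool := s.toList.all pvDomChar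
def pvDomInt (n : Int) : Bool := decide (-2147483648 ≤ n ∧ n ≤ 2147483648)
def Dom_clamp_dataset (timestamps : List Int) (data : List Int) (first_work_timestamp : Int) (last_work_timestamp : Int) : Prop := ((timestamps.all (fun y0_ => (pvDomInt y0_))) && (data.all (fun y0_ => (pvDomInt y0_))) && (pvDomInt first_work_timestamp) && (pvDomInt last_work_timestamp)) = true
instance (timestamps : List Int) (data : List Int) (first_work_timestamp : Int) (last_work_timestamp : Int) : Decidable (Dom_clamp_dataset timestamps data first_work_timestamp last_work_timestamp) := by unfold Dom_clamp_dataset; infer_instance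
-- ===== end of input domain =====

-- B replaces A's two scans (forward with break, plus reversed(list(enumerate(...))) with break)
-- by ONE forward pass that tracks both boundary indices; objective: simpler, one traversal.

-- ===== PORT A =====
-- first loop of A: scan enumerate(timestamps), break at the first timestamp > fw
def pvFindFirstA (fw : Int) : List (Int × Int) → Int → Int
  | [], acc => acc
  | (i, t) :: rest, acc => if t > fw then i else pvFindFirstA fw rest acc

-- second loop of A: scan reversed(list(enumerate(timestamps))), break at timestamps[idx] < lw
-- (timestamps[idx] with idx from enumerate is always in range, so pyGetD is exact here)
def pvFindLastA (ts : List Int) (lw : Int) : List (Int × Int) → Int → Int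
  | [], acc => acc
  | (i, _) :: rest, acc =>
      if PySem.List.pyGetD ts i 0 < lw then i else pvFindLastA ts lw rest acc

def clamp_dataset (timestamps : List Int) (data : List Int) (first_work_timestamp : Int) (last_work_timestamp : Int) : List Int × List Int :=
  let first_rpm_idx : Int :=
    pvFindFirstA first_work_timestamp (PySem.List.enumerate timestamps 0) ((timestamps.length : Int) - 1)
  let last_rpm_idx : Int :=
    pvFindLastA timestamps last_work_timestamp ((PySem.List.enumerate timestamps 0).reverse) ((timestamps.length : Int) - 1)
  (PySem.List.slice timestamps (some first_rpm_idx) (some last_rpm_idx),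
   PySem.List.slice data (some first_rpm_idx) (some last_rpm_idx))

-- ===== PORT B =====
-- loop body of B: state = (found_first, first_rpm_idx, last_rpm_idx)
def pvStepB (fw lw : Int) (st : Bool × Int × Int) (p : Int × Int) : Bool × Int × Int :=
  let st1 := if st.1 = false ∧ p.2 > fw then (true, p.1, st.2.2) else st
  if p.2 < lw then (st1.1, st1.2.1, p.1) else st1

def clamp_dataset_alt (timestamps : List Int) (data : List Int) (first_work_timestamp : Int) (last_work_timestamp : Int) : List Int × List Int :=
  let n : Int := (timestamps.length : Int)
  let st := (PySem.List.enumerate timestamps 0).foldl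
              (pvStepB first_work_timestamp last_work_timestamp) (false, n - 1, n - 1)
  (PySem.List.slice timestamps (some st.2.1) (some st.2.2),
   PySem.List.slice data (some st.2.1) (some st.2.2))

-- ===== PRECONDITION & SPEC =====
def Spec_clamp_dataset (timestamps : List Int) (data : List Int) (first_work_timestamp : Int) (last_work_timestamp : Int) (out : List Int × List Int) : Prop := out = clamp_dataset_alt timestamps data first_work_timestamp last_work_timestamp
instance (timestamps : List Int) (data : List Int) (first_work_timestamp : Int) (last_work_timestamp : Int) (out : List Int × List Int) : Decidable (Spec_clamp_dataset timestamps data first_work_timestamp last_work_timestamp out) := by unfold Spec_clamp_dataset; infer_instance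

-- ===== CLAIM (what is proved, stated in full; the proofs are below) =====
def Claim_equal_clamp_dataset : Prop := ∀ (timestamps : List Int) (data : List Int) (first_work_timestamp : Int) (last_work_timestamp : Int), Dom_clamp_dataset timestamps data first_work_timestamp last_work_timestamp → Spec_clamp_dataset timestamps data first_work_timestamp last_work_timestamp (clamp_dataset timestamps data first_work_timestamp last_work_timestamp)

-- ===== LEMMAS AND PROOFS =====

-- break-scan over a list of (index, value) pairs, testing the value (spec form of A's 2nd loop)
def pvFindL (lw : Int) : List (Int × Int) → Int → Int
  | [], acc => acc
  | p :: rest, acc => if p.2 < lw then p.1 else pvFindL lw rest acc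

-- "keep the last matching index" forward scan (what B's fold does in its last component)
def pvLastM (lw : Int) : List (Int × Int) → Int → Int
  | [], acc => acc
  | p :: rest, acc => pvLastM lw rest (if p.2 < lw then p.1 else acc)

lemma pvFindLastA_eq_findL (ts : List Int) (lw : Int) (l : List (Int × Int)) (acc : Int)
    (h : ∀ p ∈ l, PySem.List.pyGetD ts p.1 0 = p.2) :
    pvFindLastA ts lw l acc = pvFindL lw l acc := by
  induction l with
  | nil => rfl
  | cons p rest ih =>
      obtain ⟨i, t⟩ := p
      have hp := h (i, t) (by simp)
      simp only [pvFindLastA, pvFindL] at *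
      rw [hp]
      split <;> [rfl; exact ih (fun q hq => h q (by simp [hq]))]

lemma pvFindL_append_singleton (lw : Int) (u : List (Int × Int)) (x : Int × Int) (acc : Int) :
    pvFindL lw (u ++ [x]) acc = pvFindL lw u (if x.2 < lw then x.1 else acc) := by
  induction u with
  | nil => rfl
  | cons p rest ih => simp only [List.cons_append, pvFindL, ih]

lemma pvFindL_reverse (lw : Int) (l : List (Int × Int)) (acc : Int) :
    pvFindL lw l.reverse acc = pvLastM lw l acc := by
  induction l generalizing acc with
  | nil => rfl
  | cons p rest ih =>
      simp only [List.reverse_cons, pvFindL_append_singleton, pvLastM, ih]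

lemma pvFold_found (fw lw : Int) (l : List (Int × Int)) (f la : Int) :
    (l.foldl (pvStepB fw lw) (true, f, la)).1 = true ∧
    (l.foldl (pvStepB fw lw) (true, f, la)).2.1 = f := by
  induction l generalizing la with
  | nil => exact ⟨rfl, rfl⟩
  | cons p rest ih =>
      simp only [List.foldl_cons, pvStepB]
      split <;> simp_all

lemma pvFold_fst (fw lw : Int) (l : List (Int × Int)) (f la : Int) :
    (l.foldl (pvStepB fw lw) (false, f, la)).2.1 = pvFindFirstA fw l f := by
  induction l generalizing la with
  | nil => rfl
  | cons p rest ih =>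
      obtain ⟨i, t⟩ := p
      simp only [List.foldl_cons, pvStepB, pvFindFirstA]
      by_cases hgt : t > fw <;> simp only [hgt, and_true, and_false, if_pos, if_neg, not_false_iff] <;>
        [skip; skip]
      · split <;> exact (pvFold_found fw lw rest i _).2
      · split <;> exact ih _

lemma pvFold_last (fw lw : Int) (l : List (Int × Int)) (b : Bool) (f la : Int) :
    (l.foldl (pvStepB fw lw) (b, f, la)).2.2 = pvLastM lw l la := by
  induction l generalizing b f la with
  | nil => rfl
  | cons p rest ih =>
      simp only [List.foldl_cons, pvStepB, pvLastM]
      split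
      · simp only [ih]
      · split <;> simp only [ih]

lemma pvEnumerate_lookup (ts : List Int) :
    ∀ p ∈ PySem.List.enumerate ts 0, PySem.List.pyGetD ts p.1 0 = p.2 := by
  intro p hp
  rw [PySem.List.mem_enumerate_iff] at hp
  obtain ⟨k, hk, rfl⟩ := hp
  simp [PySem.List.pyGetD_natCast, List.getD_eq_getElem?_getD, hk]

-- ===== VERDICT (by name: the statement is the Claim_ definition above) =====
theorem clamp_dataset_spec : Claim_equal_clamp_dataset := by
  intro ts data fw lw _
  unfold Spec_clamp_dataset clamp_dataset clamp_dataset_alt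
  have hfirst := pvFold_fst fw lw (PySem.List.enumerate ts 0) ((ts.length : Int) - 1) ((ts.length : Int) - 1)
  have hlast := pvFold_last fw lw (PySem.List.enumerate ts 0) false ((ts.length : Int) - 1) ((ts.length : Int) - 1)
  have hA2 : pvFindLastA ts lw ((PySem.List.enumerate ts 0).reverse) ((ts.length : Int) - 1)
      = pvLastM lw (PySem.List.enumerate ts 0) ((ts.length : Int) - 1) := by
    rw [pvFindLastA_eq_findL ts lw _ _ (fun p hp => pvEnumerate_lookup ts p (List.mem_reverse.mp hp)),
        pvFindL_reverse]
  simp only [hfirst, hlast, hA2]
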